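-- pv_equiv track=rewrite | github.com/mulefish/projectvis | walk.py | buildShortName
-- ===== SOURCE A (Python) =====
-- def buildShortName(path, filename, delimiter):
--     """
--     CONVERT
--     ['.', 'data2', 'src', 'components', 'Article'] CommentContainer.js
--     TO
--     components/Article/CommentContainer.js
--     """
--     result = ""
--     flag = False
--     for dir in path:
--         if flag == True:
--             result += dir + "/"
--         if dir == delimiter:
--             flag = True
--     result += filename
--     return result
-- ===== SOURCE B (Python) =====
-- def buildShortName(path, filename, delimiter):
--     if delimiter not in path:
--         return filename
--     idx = path.index(delimiter)
--     return "/".join(path[idx + 1:] + [filename])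
-- ===== Notes on version B (the rewrite author's own statement) =====
-- stated objective: simpler
-- what changed: Replaces the flag-driven accumulation loop (per-element branch plus a running string) with locate-the-delimiter, slice the tail, and one '/'-join over tail+filename.
import Mathlib
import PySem

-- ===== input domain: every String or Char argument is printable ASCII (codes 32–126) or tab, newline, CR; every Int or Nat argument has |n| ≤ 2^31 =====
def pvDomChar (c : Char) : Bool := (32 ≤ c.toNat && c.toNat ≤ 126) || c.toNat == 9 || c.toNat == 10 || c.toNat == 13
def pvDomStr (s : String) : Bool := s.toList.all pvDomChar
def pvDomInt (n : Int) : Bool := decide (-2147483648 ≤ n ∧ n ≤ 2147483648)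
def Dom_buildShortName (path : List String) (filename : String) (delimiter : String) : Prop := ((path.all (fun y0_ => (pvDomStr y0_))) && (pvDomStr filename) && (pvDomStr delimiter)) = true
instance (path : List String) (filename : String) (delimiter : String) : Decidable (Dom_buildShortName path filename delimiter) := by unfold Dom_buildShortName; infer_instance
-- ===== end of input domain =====

-- B drops A's flag-driven accumulation loop: it locates the delimiter, slices the tail, and joins tail+filename with "/" (objective: simpler).

-- ===== PORT A =====
def buildShortName (path : List String) (filename : String) (delimiter : String) : String :=
  let st := path.foldl (fun (acc : String × Bool) dir =>
      ((if acc.2 then acc.1 ++ dir ++ "/" else acc.1),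
       (if dir == delimiter then true else acc.2))) ("", false)
  st.1 ++ filename

-- ===== PORT B =====
def buildShortName_alt (path : List String) (filename : String) (delimiter : String) : String :=
  if delimiter ∈ path then
    let idx := (PySem.List.index? path delimiter).getD 0
    PySem.Str.join "/" (PySem.List.slice path (some ((idx : Int) + 1)) none ++ [filename])
  else
    filename

-- ===== PRECONDITION & SPEC =====
def Spec_buildShortName (path : List String) (filename : String) (delimiter : String) (out : String) : Prop := out = buildShortName_alt path filename delimiter
instance (path : List String) (filename : String) (delimiter : String) (out : String) : Decidable (Spec_buildShortName path filename delimiter out) := by unfold Spec_buildShortName; infer_instance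

-- ===== CLAIM (what is proved, stated in full; the proofs are below) =====
def Claim_equal_buildShortName : Prop := ∀ (path : List String) (filename : String) (delimiter : String), Dom_buildShortName path filename delimiter → Spec_buildShortName path filename delimiter (buildShortName path filename delimiter)

-- ===== LEMMAS AND PROOFS =====

theorem str_join_singleton (sep p : String) : PySem.Str.join sep [p] = p := by
  apply String.toList_inj.mp
  simp [PySem.Str.toList_join, PySem.Chars.join_singleton]

theorem str_join_cons (sep p q : String) (l : List String) :
    PySem.Str.join sep (p :: q :: l) = p ++ sep ++ PySem.Str.join sep (q :: l) := by
  apply String.toList_inj.mp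
  simp [PySem.Str.toList_join, PySem.Chars.join_cons_cons]

-- A's loop once the flag is true: it appends every remaining dir plus "/".
theorem foldA_true (filename delimiter : String) :
    ∀ (l : List String) (r : String),
      ((l.foldl (fun (acc : String × Bool) dir =>
          ((if acc.2 then acc.1 ++ dir ++ "/" else acc.1),
           (if dir == delimiter then true else acc.2))) (r, true)).1 ++ filename)
        = r ++ PySem.Str.join "/" (l ++ [filename]) := by
  intro l
  induction l with
  | nil => intro r; simp [str_join_singleton]
  | cons d t ih =>
      intro r
      simp only [List.foldl_cons, if_pos, ite_self]
      rw [ih (r ++ d ++ "/")]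
      rcases t with _ | ⟨q, t'⟩
      · simp [str_join_cons, str_join_singleton, String.append_assoc]
      · simp [str_join_cons, String.append_assoc]

-- A's loop before the flag is set, related to B's locate-slice-join result.
theorem foldA_false (filename delimiter : String) :
    ∀ (l : List String) (r : String),
      ((l.foldl (fun (acc : String × Bool) dir =>
          ((if acc.2 then acc.1 ++ dir ++ "/" else acc.1),
           (if dir == delimiter then true else acc.2))) (r, false)).1 ++ filename)
        = r ++ buildShortName_alt l filename delimiter := by
  intro l
  induction l with
  | nil => intro r; simp [buildShortName_alt]
  | cons d t ih =>
      intro r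
      by_cases hd : d = delimiter
      · subst hd
        simp only [List.foldl_cons, beq_self_eq_true, if_pos, if_neg, Bool.false_eq_true,
          not_false_iff]
        rw [foldA_true]
        have hmem : d ∈ d :: t := List.mem_cons_self
        have hsl : PySem.List.slice (d :: t) (some (1 : Int)) none = t := by
          simpa using PySem.List.slice_from_natCast (d :: t) 1
        have hidx2 : List.idxOf? d (d :: t) = some 0 := by
          have := PySem.List.index?_cons_self d t
          rwa [PySem.List.index?_eq_idxOf?] at this
        simp [buildShortName_alt, hmem, hidx2, hsl]
      · have hbeq : (d == delimiter) = false := by simp [hd]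
        have hd' : delimiter ≠ d := fun h => hd h.symm
        simp only [List.foldl_cons, hbeq, Bool.false_eq_true, if_neg, not_false_iff]
        rw [ih r]
        congr 1
        cases hidx : PySem.List.index? t delimiter with
        | none =>
            have hm : delimiter ∉ t := (PySem.List.index?_eq_none_iff t delimiter).mp hidx
            have hm' : delimiter ∉ d :: t := by simp [List.mem_cons, hm, hd']
            simp [buildShortName_alt, hm, hm']
        | some i =>
            have hm : delimiter ∈ t := (PySem.List.index?_isSome_iff t delimiter).mp
              (by rw [hidx]; rfl)
            have hm' : delimiter ∈ d :: t := List.mem_cons_of_mem _ hm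
            have hcons : PySem.List.index? (d :: t) delimiter = some (i + 1) := by
              rw [PySem.List.index?_cons_of_ne t hd, hidx]; rfl
            have hidx' : List.idxOf? delimiter t = some i := by
              rwa [PySem.List.index?_eq_idxOf?] at hidx
            have hcons' : List.idxOf? delimiter (d :: t) = some (i + 1) := by
              rwa [PySem.List.index?_eq_idxOf?] at hcons
            have hseq : PySem.List.slice (d :: t) (some (((i : Nat) : Int) + 1 + 1)) none
                = PySem.List.slice t (some (((i : Nat) : Int) + 1)) none := by
              have h1 : (((i : Nat) : Int) + 1) = (((i + 1 : Nat) : Int)) := by push_cast; ring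
              have h2 : (((i : Nat) : Int) + 1 + 1) = (((i + 2 : Nat) : Int)) := by push_cast; ring
              rw [h2, h1, PySem.List.slice_from_natCast, PySem.List.slice_from_natCast]
              simp
            simp [buildShortName_alt, hm, hm', hidx', hcons', hseq]

-- ===== VERDICT (by name: the statement is the Claim_ definition above) =====
theorem buildShortName_spec : Claim_equal_buildShortName := by
  intro path filename delimiter _
  unfold Spec_buildShortName buildShortName
  simpa using foldA_false filename delimiter path ""
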